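-- pv_equiv track=rewrite | github.com/RookieAND/Algorithm | 프로그래머스/lv2/60057. 문자열 압축/문자열 압축.py | solution
-- ===== SOURCE A (Python) =====
-- def solution(s):
--     answer = len(s)
--     for length in range(1, len(s) // 2 + 1):
--         shorten = ""
--         current, amount = s[0:length], 1
--         for i in range(length, len(s) + 1, length):
--             word = s[i:i+length]
--             if current == word:
--                 amount += 1
--             else:
--                 shorten += f"{amount}{current}" if amount > 1 else current
--                 current, amount = word, 1
--         shorten += current
--         answer = min(answer, len(shorten))
--     return answer
-- ===== SOURCE B (Python) =====
-- def solution(s):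
--     n = len(s)
--     # lcp[i][j] = length of the longest common prefix of s[i:] and s[j:]
--     lcp = [[0] * (n + 1)]
--     for i in range(n - 1, -1, -1):
--         nxt = lcp[0]
--         lcp = [[(nxt[j + 1] + 1 if s[i] == s[j] else 0) for j in range(n)] + [0]] + lcp
--     best = n
--     for k in range(1, n // 2 + 1):
--         m = (n + k - 1) // k
--         total, run = 0, 1
--         for t in range(1, m):
--             if n - t * k >= k and lcp[(t - 1) * k][t * k] >= k:
--                 run += 1
--             else:
--                 total += k + (len(str(run)) if run > 1 else 0)
--                 run = 1
--         total += (n - (m - 1) * k) + (len(str(run)) if run > 1 else 0)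
--         best = min(best, total)
--     return best
-- ===== Notes on version B (the rewrite author's own statement) =====
-- stated objective: alternative
-- what changed: B precomputes a longest-common-prefix DP table lcp[i][j] over suffix pairs once, then for each block size k decides adjacent-block equality arithmetically (n - t*k >= k and lcp[(t-1)k][tk] >= k) and sums run lengths, never slicing or comparing substrings and never building a compressed string.
import Mathlib
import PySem

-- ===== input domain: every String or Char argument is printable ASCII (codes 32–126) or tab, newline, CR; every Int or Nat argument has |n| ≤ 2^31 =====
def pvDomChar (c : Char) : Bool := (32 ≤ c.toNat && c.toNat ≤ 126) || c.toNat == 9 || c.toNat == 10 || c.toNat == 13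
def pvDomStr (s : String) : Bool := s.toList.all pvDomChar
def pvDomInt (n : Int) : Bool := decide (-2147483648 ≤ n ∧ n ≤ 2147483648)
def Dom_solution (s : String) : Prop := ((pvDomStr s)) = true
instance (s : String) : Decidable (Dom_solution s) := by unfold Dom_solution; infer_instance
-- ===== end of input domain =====

-- B replaces A's repeated substring slicing/comparison and string building by a
-- precomputed suffix-LCP DP table: adjacent-block equality becomes an arithmetic
-- test on the table and the compressed length is summed per run (alternative algorithm).

-- ===== PORT A =====
-- the body of A's inner loop: state (shorten, current, amount), next word
def pvStep (st : List Char × List Char × Int) (word : List Char) :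
    List Char × List Char × Int :=
  if st.2.1 == word then (st.1, st.2.1, st.2.2 + 1)
  else (st.1 ++ (if 1 < st.2.2 then (PySem.Int.toStr st.2.2).toList ++ st.2.1 else st.2.1),
        word, 1)

def solution (s : String) : Int :=
  let xs := s.toList
  let n : Int := PySem.Str.len s
  (PySem.List.pyRange 1 (PySem.Int.floordiv n 2 + 1) 1).foldl
    (fun answer length =>
      let st := (PySem.List.pyRange length (n + 1) length).foldl
        (fun st i => pvStep st (PySem.List.slice xs (some i) (some (i + length))))
        ([], PySem.List.slice xs (some 0) (some length), 1)
      min answer (((st.1 ++ st.2.1).length : Int)))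
    n

-- ===== PORT B =====
-- len(str(c))
def pvDigits (c : Int) : Int := ((PySem.Int.toStr c).toList.length : Int)

-- lcp[i][j] (indices always in range at every call site, so the default is never read)
def pvGet2 (tbl : List (List Int)) (i j : Int) : Int :=
  (PySem.List.pyGet? ((PySem.List.pyGet? tbl i).getD []) j).getD 0

def solution_alt (s : String) : Int :=
  let xs := s.toList
  let n : Int := (xs.length : Int)
  -- lcp table, built row by row from the bottom (lcp = [row] + lcp)
  let tbl := (PySem.List.pyRange (n - 1) (-1) (-1)).foldl
    (fun lcp i =>
      let nxt := lcp.headD []      -- lcp[0]; lcp is never empty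
      (((PySem.List.pyRange 0 n 1).map (fun j =>
          if PySem.List.pyGet? xs i = PySem.List.pyGet? xs j
          then (PySem.List.pyGet? nxt (j + 1)).getD 0 + 1 else 0)) ++ [0]) :: lcp)
    [PySem.List.pyRepeat [(0 : Int)] (n + 1)]
  (PySem.List.pyRange 1 (PySem.Int.floordiv n 2 + 1) 1).foldl
    (fun best k =>
      let m := PySem.Int.floordiv (n + k - 1) k
      let st := (PySem.List.pyRange 1 m 1).foldl
        (fun st t =>
          if k ≤ n - t * k ∧ k ≤ pvGet2 tbl ((t - 1) * k) (t * k)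
          then (st.1, st.2 + 1)
          else (st.1 + k + (if 1 < st.2 then pvDigits st.2 else 0), (1 : Int)))
        ((0 : Int), (1 : Int))
      min best (st.1 + (n - (m - 1) * k) + (if 1 < st.2 then pvDigits st.2 else 0)))
    n

-- ===== PRECONDITION & SPEC =====
def Spec_solution (s : String) (out : Int) : Prop := out = solution_alt s
instance (s : String) (out : Int) : Decidable (Spec_solution s out) := by unfold Spec_solution; infer_instance

-- ===== CLAIM (what is proved, stated in full; the proofs are below) =====
def Claim_equal_solution : Prop := ∀ (s : String), Dom_solution s → Spec_solution s (solution s)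

-- ===== LEMMAS AND PROOFS =====

-- longest common prefix of two suffix lists (the value B's table holds)
def pvLcpN : List Char → List Char → Nat
  | a :: as, b :: bs => if a = b then pvLcpN as bs + 1 else 0
  | _, _ => 0

lemma pvLcpN_nil_right (a : List Char) : pvLcpN a [] = 0 := by cases a <;> rfl

lemma pvLcpN_nil_left (b : List Char) : pvLcpN [] b = 0 := by cases b <;> rfl

lemma pvLcpN_ge_iff : ∀ (k : Nat) (a b : List Char), k ≤ a.length →
    (k ≤ pvLcpN a b ↔ a.take k = b.take k) := by
  intro k
  induction k with
  | zero => intro a b _; simp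
  | succ k ih =>
    intro a b hk
    match a, b with
    | [], _ => simp at hk
    | x :: as, [] =>
      simp [pvLcpN_nil_right]
    | x :: as, y :: bs =>
      simp only [pvLcpN, List.take_succ_cons]
      by_cases hxy : x = y
      · subst hxy
        rw [if_pos rfl]
        constructor
        · intro h
          have := (ih as bs (by simpa using hk)).mp (by omega)
          simp [this]
        · intro h
          have h2 : as.take k = bs.take k := by simpa using h
          have := (ih as bs (by simpa using hk)).mpr h2
          omega
      · rw [if_neg hxy]
        constructor
        · omega
        · intro h; exact absurd (List.cons.injEq .. ▸ h).1 hxy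

-- row i of the lcp table, and the table holding rows m..n
def pvRow (xs : List Char) (i : Nat) : List Int :=
  (List.range (xs.length + 1)).map (fun j => ((pvLcpN (xs.drop i) (xs.drop j) : Nat) : Int))

def pvTbl (xs : List Char) (m : Nat) : List (List Int) :=
  (List.range' m (xs.length + 1 - m)).map (pvRow xs)

lemma pvRow_top (xs : List Char) : pvRow xs xs.length = List.replicate (xs.length + 1) 0 := by
  unfold pvRow
  rw [List.eq_replicate_iff]
  constructor
  · simp
  · intro b hb
    obtain ⟨j, _, rfl⟩ := List.mem_map.mp hb
    simp [pvLcpN_nil_left]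

lemma pvTbl_top (xs : List Char) : pvTbl xs xs.length = [pvRow xs xs.length] := by
  unfold pvTbl
  simp

lemma pvTbl_step (xs : List Char) (m : Nat) (hm : m < xs.length) :
    pvRow xs m :: pvTbl xs (m + 1) = pvTbl xs m := by
  unfold pvTbl
  rw [show xs.length + 1 - m = (xs.length + 1 - (m + 1)) + 1 by omega, List.range'_succ]
  simp

-- the computed row equals the spec row
lemma pvRow_build (xs : List Char) (m : Nat) (hm : m < xs.length) :
    ((PySem.List.pyRange 0 (xs.length : Int) 1).map (fun j =>
        if PySem.List.pyGet? xs ((m : Nat) : Int) = PySem.List.pyGet? xs j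
        then (PySem.List.pyGet? (pvRow xs (m + 1)) (j + 1)).getD 0 + 1 else 0)) ++ [0]
      = pvRow xs m := by
  rw [PySem.List.pyRange_zero_nat, List.map_map]
  conv_rhs => rw [pvRow, List.range_succ, List.map_append]
  congr 1
  · apply List.map_congr_left
    intro j hj
    have hjn : j < xs.length := List.mem_range.mp hj
    have hdm : xs.drop m = xs[m] :: xs.drop (m + 1) := List.drop_eq_getElem_cons hm
    have hdj : xs.drop j = xs[j] :: xs.drop (j + 1) := List.drop_eq_getElem_cons hjn
    have hget : (PySem.List.pyGet? (pvRow xs (m + 1)) ((j : Int) + 1)).getD 0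
        = ((pvLcpN (xs.drop (m + 1)) (xs.drop (j + 1)) : Nat) : Int) := by
      rw [show ((j : Int) + 1) = ((j + 1 : Nat) : Int) by push_cast; ring,
        PySem.List.pyGet?_natCast]
      simp [pvRow, Nat.succ_lt_succ hjn]
    simp only [Function.comp, PySem.List.pyGet?_natCast,
      List.getElem?_eq_getElem hm, List.getElem?_eq_getElem hjn, Option.some.injEq, hget]
    rw [hdm, hdj]
    simp only [pvLcpN]
    split_ifs <;> push_cast <;> ring
  · simp [List.drop_length, pvLcpN_nil_right]

lemma pvTbl_head (xs : List Char) (m : Nat) (hm : m ≤ xs.length) :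
    (pvTbl xs m).headD [] = pvRow xs m := by
  unfold pvTbl
  rw [show xs.length + 1 - m = (xs.length - m) + 1 by omega, List.range'_succ]
  simp

-- the fold in solution_alt builds exactly pvTbl xs 0
lemma pvTbl_build (xs : List Char) : ∀ (m : Nat), m ≤ xs.length →
    (PySem.List.pyRange ((m : Int) - 1) (-1) (-1)).foldl
      (fun lcp i =>
        let nxt := lcp.headD []
        (((PySem.List.pyRange 0 (xs.length : Int) 1).map (fun j =>
            if PySem.List.pyGet? xs i = PySem.List.pyGet? xs j
            then (PySem.List.pyGet? nxt (j + 1)).getD 0 + 1 else 0)) ++ [0]) :: lcp)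
      (pvTbl xs m)
    = pvTbl xs 0 := by
  intro m
  induction m with
  | zero =>
    intro _
    rw [PySem.List.pyRange_neg_one_eq_nil (by omega)]
    rfl
  | succ m ih =>
    intro hm
    have hc : ((m + 1 : Nat) : Int) - 1 = (m : Int) := by push_cast; ring
    rw [hc, PySem.List.pyRange_neg_one_cons (by omega), List.foldl_cons]
    simp only [pvTbl_head xs (m + 1) hm]
    rw [pvRow_build xs m (by omega), pvTbl_step xs m (by omega)]
    exact ih (by omega)

lemma pvGet2_tbl (xs : List Char) (i j : Nat) (hi : i ≤ xs.length) (hj : j ≤ xs.length) :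
    pvGet2 (pvTbl xs 0) ((i : Nat) : Int) ((j : Nat) : Int)
      = ((pvLcpN (xs.drop i) (xs.drop j) : Nat) : Int) := by
  unfold pvGet2 pvTbl
  rw [Nat.sub_zero, ← List.range_eq_range']
  simp [Nat.lt_succ_of_le hi, Nat.lt_succ_of_le hj, pvRow]

-- abstract value of A's inner loop: length of the compressed string it builds
def pvGLen (cur : List Char) (amt : Int) : List (List Char) → Int
  | [] => (cur.length : Int)
  | w :: ws =>
      if cur == w then pvGLen cur (amt + 1) ws
      else (if 1 < amt then pvDigits amt else 0) + (cur.length : Int) + pvGLen w 1 ws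

-- run-length compressed length of a block list (both ports reduce to this)
def pvRunLen (b : List Char) : List (List Char) → Nat
  | [] => 0
  | w :: ws => if w == b then pvRunLen b ws + 1 else 0

def pvScan : List (List Char) → Int → Int
  | [], total => total
  | b :: rest, total =>
      let cnt := pvRunLen b (b :: rest)
      pvScan ((b :: rest).drop cnt)
        (total + (b.length : Int) + (if 1 < cnt then pvDigits (cnt : Int) else 0))
  termination_by bs _ => bs.length
  decreasing_by simp [pvRunLen]

lemma pvScan_cons (b : List Char) (rest : List (List Char)) (total : Int) :
    pvScan (b :: rest) total
      = pvScan (rest.drop (pvRunLen b rest))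
          (total + (b.length : Int)
            + (if 1 < pvRunLen b rest + 1 then pvDigits ((pvRunLen b rest + 1 : Nat) : Int) else 0)) := by
  rw [pvScan]
  have hr : pvRunLen b (b :: rest) = pvRunLen b rest + 1 := by simp [pvRunLen]
  rw [hr, List.drop_succ_cons]

lemma pvRunLen_le (b : List Char) : ∀ ds : List (List Char), pvRunLen b ds ≤ ds.length := by
  intro ds
  induction ds with
  | nil => simp [pvRunLen]
  | cons w ws ih => simp only [pvRunLen, List.length_cons]; split <;> omega

lemma pvRunLen_append_last (b t : List Char) (h : ¬ (t == b)) :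
    ∀ ds : List (List Char), pvRunLen b (ds ++ [t]) = pvRunLen b ds := by
  intro ds
  induction ds with
  | nil => simp [pvRunLen, h]
  | cons w ws ih => simp only [List.cons_append, pvRunLen, ih]

lemma pvScan_shift : ∀ (N : Nat) (bs : List (List Char)), bs.length ≤ N →
    ∀ (u v : Int), pvScan bs (u + v) = u + pvScan bs v := by
  intro N
  induction N with
  | zero =>
    intro bs hbs u v
    have : bs = [] := List.eq_nil_of_length_eq_zero (Nat.le_zero.mp hbs)
    subst this; simp [pvScan]
  | succ N ih =>
    intro bs hbs u v
    match bs with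
    | [] => simp [pvScan]
    | b :: rest =>
      rw [pvScan, pvScan]
      have hlen : ((b :: rest).drop (pvRunLen b (b :: rest))).length ≤ N := by
        have h1 : 1 ≤ pvRunLen b (b :: rest) := by simp [pvRunLen]
        have := pvRunLen_le b (b :: rest)
        simp only [List.length_drop, List.length_cons] at *
        omega
      rw [show u + v + (b.length : Int)
            + (if 1 < pvRunLen b (b :: rest) then pvDigits (pvRunLen b (b :: rest) : Int) else 0)
          = u + (v + (b.length : Int)
            + (if 1 < pvRunLen b (b :: rest) then pvDigits (pvRunLen b (b :: rest) : Int) else 0)) by ring]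
      exact ih _ hlen u _

lemma pvScan_acc (bs : List (List Char)) (t : Int) : pvScan bs t = t + pvScan bs 0 := by
  have := pvScan_shift bs.length bs le_rfl t 0
  simpa using this

lemma pvScan_append_last : ∀ (N : Nat) (ds : List (List Char)), ds.length ≤ N →
    ∀ t : List Char, t ∉ ds → pvScan (ds ++ [t]) 0 = pvScan ds 0 + (t.length : Int) := by
  intro N
  induction N with
  | zero =>
    intro ds hds t ht
    have : ds = [] := List.eq_nil_of_length_eq_zero (Nat.le_zero.mp hds)
    subst this
    simp [pvScan, pvRunLen]
  | succ N ih =>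
    intro ds hds t ht
    match ds with
    | [] => simp [pvScan, pvRunLen]
    | d :: ds' =>
      have htd : ¬ (t == d) := by
        simp only [beq_iff_eq]
        intro h; exact ht (by simp [h])
      have hrun : pvRunLen d ((d :: ds') ++ [t]) = pvRunLen d (d :: ds') :=
        pvRunLen_append_last d t htd _
      have hle : pvRunLen d (d :: ds') ≤ (d :: ds').length := pvRunLen_le _ _
      have hdrop : ((d :: ds') ++ [t]).drop (pvRunLen d (d :: ds'))
          = (d :: ds').drop (pvRunLen d (d :: ds')) ++ [t] :=
        List.drop_append_of_le_length hle
      have h1 : 1 ≤ pvRunLen d (d :: ds') := by simp [pvRunLen]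
      have hlen : ((d :: ds').drop (pvRunLen d (d :: ds'))).length ≤ N := by
        simp only [List.length_drop, List.length_cons] at *
        omega
      have htdrop : t ∉ (d :: ds').drop (pvRunLen d (d :: ds')) :=
        fun hmem => ht (List.mem_of_mem_drop hmem)
      rw [show (d :: ds') ++ [t] = d :: (ds' ++ [t]) from rfl, pvScan]
      rw [show d :: (ds' ++ [t]) = (d :: ds') ++ [t] from rfl, hrun, hdrop]
      rw [pvScan_acc ((d :: ds').drop (pvRunLen d (d :: ds')) ++ [t]) _]
      rw [ih _ hlen t htdrop]
      rw [pvScan]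
      rw [pvScan_acc ((d :: ds').drop (pvRunLen d (d :: ds')))
        (0 + (d.length : Int)
          + (if 1 < pvRunLen d (d :: ds') then pvDigits (pvRunLen d (d :: ds') : Int) else 0))]
      ring

lemma pvGLen_eq_scan : ∀ (ws : List (List Char)) (b t : List Char) (amt : Int),
    1 ≤ amt → t ≠ b → t ∉ ws →
    pvGLen b amt (ws ++ [t]) =
      (if 1 < amt + (pvRunLen b ws : Int) then pvDigits (amt + (pvRunLen b ws : Int)) else 0)
        + (b.length : Int) + pvScan (ws.drop (pvRunLen b ws)) 0 + (t.length : Int) := by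
  intro ws
  induction ws with
  | nil =>
    intro b t amt ha htb htm
    have hbt : ¬ (b == t) := by simp [beq_iff_eq]; exact fun h => htb h.symm
    simp only [List.nil_append, pvGLen, pvRunLen, hbt, Bool.false_eq_true, if_false,
      Nat.cast_zero, add_zero, List.drop_nil, pvScan]
  | cons w ws' ih =>
    intro b t amt ha htb htm
    have htw : t ≠ w := fun h => (by simp [h] at htm)
    have htm' : t ∉ ws' := fun h => (by simp [h] at htm)
    by_cases hbw : b = w
    · subst hbw
      have hbb : (b == b) = true := by simp
      simp only [List.cons_append, pvGLen, hbb, if_true, pvRunLen, Nat.cast_add, Nat.cast_one,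
        List.drop_succ_cons]
      rw [ih b t (amt + 1) (by omega) htb htm']
      have : amt + 1 + (pvRunLen b ws' : Int) = amt + ((pvRunLen b ws' : Int) + 1) := by ring
      rw [this]
    · have hbw' : ¬ (b == w) := by simp [beq_iff_eq, hbw]
      have hwb' : ¬ (w == b) := by simp [beq_iff_eq]; exact fun h => hbw h.symm
      simp only [List.cons_append, pvGLen, hbw', hwb', Bool.false_eq_true, if_false, pvRunLen,
        Nat.cast_zero, add_zero, List.drop_zero]
      rw [ih w t 1 le_rfl htw htm']
      rw [pvScan_cons]
      rw [pvScan_acc (ws'.drop (pvRunLen w ws'))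
        (0 + (w.length : Int)
          + (if 1 < pvRunLen w ws' + 1 then pvDigits ((pvRunLen w ws' + 1 : Nat) : Int) else 0))]
      have hc : ((pvRunLen w ws' + 1 : Nat) : Int) = 1 + (pvRunLen w ws' : Int) := by
        push_cast; ring
      have hcond : (1 < pvRunLen w ws' + 1) ↔ (1 < 1 + (pvRunLen w ws' : Int)) := by omega
      rw [if_congr hcond (by rw [hc]) rfl]
      ring

lemma pvGLen_one_eq_scan (ws : List (List Char)) (b t : List Char) (ht : t ∉ b :: ws) :
    pvGLen b 1 (ws ++ [t]) = pvScan (b :: ws) 0 + (t.length : Int) := by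
  have htb : t ≠ b := fun h => (by simp [h] at ht)
  have htm : t ∉ ws := fun h => (by simp [h] at ht)
  rw [pvGLen_eq_scan ws b t 1 le_rfl htb htm]
  rw [pvScan_cons]
  rw [pvScan_acc (ws.drop (pvRunLen b ws))
    (0 + (b.length : Int)
      + (if 1 < pvRunLen b ws + 1 then pvDigits ((pvRunLen b ws + 1 : Nat) : Int) else 0))]
  have hc : ((pvRunLen b ws + 1 : Nat) : Int) = 1 + (pvRunLen b ws : Int) := by push_cast; ring
  have hcond : (1 < pvRunLen b ws + 1) ↔ (1 < 1 + (pvRunLen b ws : Int)) := by omega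
  rw [if_congr hcond (by rw [hc]) rfl]
  ring

lemma foldl_pvStep_len : ∀ (ws : List (List Char)) (sh cur : List Char) (amt : Int),
    (((ws.foldl pvStep (sh, cur, amt)).1 ++ (ws.foldl pvStep (sh, cur, amt)).2.1).length : Int)
      = (sh.length : Int) + pvGLen cur amt ws := by
  intro ws
  induction ws with
  | nil =>
    intro sh cur amt
    simp [pvGLen]
  | cons w ws' ih =>
    intro sh cur amt
    by_cases hcw : cur = w
    · subst hcw
      simp only [List.foldl_cons, pvStep, beq_self_eq_true, if_true]
      rw [ih sh cur (amt + 1)]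
      simp [pvGLen]
    · have hcw' : ¬ (cur == w) := by simp [beq_iff_eq, hcw]
      simp only [List.foldl_cons, pvStep, hcw', Bool.false_eq_true, if_false]
      rw [ih]
      simp only [pvGLen, hcw', Bool.false_eq_true, if_false, pvDigits]
      split_ifs <;> (simp only [List.length_append]; push_cast; ring)

lemma words_range (m k : Nat) (hk : 0 < k) (hkm : k ≤ m) :
    PySem.List.pyRange (k : Int) ((m : Int) + 1) (k : Int)
      = (List.range (m / k)).map (fun t => (((t + 1) * k : Nat) : Int)) := by
  rw [PySem.List.pyRange_of_pos _ _ (by exact_mod_cast hk)]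
  rw [if_pos (by omega : (k : Int) < (m : Int) + 1)]
  have h1 : ((m : Int) + 1 - k + k - 1) / k = ((m / k : Nat) : Int) := by
    rw [show ((m : Int) + 1 - k + k - 1) = (m : Int) by ring]
    exact (Int.natCast_ediv m k).symm
  rw [h1, Int.toNat_natCast]
  exact List.map_congr_left (fun t _ => by push_cast; ring)

lemma fold_cast_slice (xs : List Char) (k : Nat) :
    ∀ (l : List Nat) (init : List Char × List Char × Int),
    (l.map (fun t : Nat => ((t * k : Nat) : Int))).foldl
        (fun st i => pvStep st (PySem.List.slice xs (some i) (some (i + (k : Int))))) init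
      = (l.map (fun t => (xs.drop (t * k)).take k)).foldl pvStep init := by
  intro l
  induction l with
  | nil => intro init; rfl
  | cons t l ih =>
    intro init
    simp only [List.map_cons, List.foldl_cons, PySem.List.slice_natCast_add, ih]

lemma inner_eq (xs : List Char) (k : Nat) (hk : 1 ≤ k) (hkm : 2 * k ≤ xs.length) :
    ((((PySem.List.pyRange (k : Int) ((xs.length : Int) + 1) (k : Int)).foldl
        (fun st i => pvStep st (PySem.List.slice xs (some i) (some (i + (k : Int)))))
        ([], PySem.List.slice xs (some 0) (some (k : Int)), 1)).1
      ++ ((PySem.List.pyRange (k : Int) ((xs.length : Int) + 1) (k : Int)).foldl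
        (fun st i => pvStep st (PySem.List.slice xs (some i) (some (i + (k : Int)))))
        ([], PySem.List.slice xs (some 0) (some (k : Int)), 1)).2.1).length : Int)
    = pvScan ((List.range ((xs.length + k - 1) / k)).map
        (fun t => (xs.drop (t * k)).take k)) 0 := by
  have hk0 : 0 < k := hk
  have hkm1 : k ≤ xs.length := by omega
  set m := xs.length with hmm
  set q := m / k with hq
  set r := m % k with hr
  have hq2 : 2 ≤ q := (Nat.le_div_iff_mul_le hk0).mpr (by omega)
  have hdm : k * q + r = m := Nat.div_add_mod m k
  have hrk : r < k := Nat.mod_lt _ hk0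
  have hFlen : ∀ t, t < q → ((xs.drop (t * k)).take k).length = k := by
    intro t ht
    simp only [List.length_take, List.length_drop]
    have h1 : (t + 1) * k ≤ q * k := Nat.mul_le_mul_right k (by omega)
    have h3 : (t + 1) * k = t * k + k := by ring
    have h4 : q * k = k * q := Nat.mul_comm _ _
    omega
  have hFq : ((xs.drop (q * k)).take k).length = r := by
    simp only [List.length_take, List.length_drop]
    have h4 : q * k = k * q := Nat.mul_comm _ _
    omega
  have hinit : PySem.List.slice xs (some 0) (some (k : Int)) = (xs.drop (0 * k)).take k := by
    rw [PySem.List.slice_zero_start, PySem.List.slice_to_natCast]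
    simp
  -- rewrite A's index range and fold into a fold of pvStep over the word list
  rw [words_range m k hk0 hkm1]
  rw [show (List.range q).map (fun t => ((((t + 1) * k : Nat)) : Int))
      = (((List.range q).map (fun t => t + 1)).map (fun t : Nat => ((t * k : Nat) : Int))) by
    rw [List.map_map]; rfl]
  rw [hinit, fold_cast_slice, List.map_map]
  rw [show (List.range q).map ((fun t => (xs.drop (t * k)).take k) ∘ fun t => t + 1)
      = (List.range q).map (fun t => (xs.drop ((t + 1) * k)).take k) from rfl]
  rw [foldl_pvStep_len]
  -- split the word list into mid ++ [last chunk]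
  have hsplit : (List.range q).map (fun t => (xs.drop ((t + 1) * k)).take k)
      = (List.range (q - 1)).map (fun t => (xs.drop ((t + 1) * k)).take k)
        ++ [(xs.drop (q * k)).take k] := by
    rw [show q = (q - 1) + 1 by omega, List.range_succ, List.map_append]
    simp
  have hmidlen : ∀ x ∈ (List.range (q - 1)).map (fun t => (xs.drop ((t + 1) * k)).take k),
      x.length = k := by
    intro x hx
    obtain ⟨t, ht, rfl⟩ := List.mem_map.mp hx
    exact hFlen (t + 1) (by simp at ht; omega)
  have hheadlen : ((xs.drop (0 * k)).take k).length = k := hFlen 0 (by omega)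
  have hrangeq : ∀ qq : Nat, 0 < qq → (List.range qq).map (fun t => (xs.drop (t * k)).take k)
      = (xs.drop (0 * k)).take k
        :: (List.range (qq - 1)).map (fun t => (xs.drop ((t + 1) * k)).take k) := by
    intro qq hqq
    conv_lhs => rw [show qq = (qq - 1) + 1 by omega]
    rw [List.range_succ_eq_map, List.map_cons, List.map_map]
    rfl
  by_cases hr0 : r = 0
  · -- k divides m: the trailing word is the empty sentinel
    have hqq : (m + k - 1) / k = q := by
      rw [show m + k - 1 = k * q + (k - 1) by omega, Nat.mul_add_div hk0]
      rw [Nat.div_eq_of_lt (by omega)]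
      omega
    have hqnil : (xs.drop (q * k)).take k = [] := by
      have hle : xs.length ≤ q * k := by
        have h4 : q * k = k * q := Nat.mul_comm _ _
        omega
      simp [List.drop_eq_nil_of_le hle]
    have hnotin : ([] : List Char) ∉ (xs.drop (0 * k)).take k
        :: (List.range (q - 1)).map (fun t => (xs.drop ((t + 1) * k)).take k) := by
      intro hmem
      rcases List.mem_cons.mp hmem with h | h
      · rw [← h] at hheadlen; simp at hheadlen; omega
      · have h2 := hmidlen [] h
        simp at h2; omega
    rw [hqq, hrangeq q (by omega), hsplit, hqnil]
    rw [pvGLen_one_eq_scan _ _ _ hnotin]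
    simp
  · -- k does not divide m: the trailing word is the short tail block
    have hqq : (m + k - 1) / k = q + 1 := by
      rw [show m + k - 1 = k * q + (r + k - 1) by omega, Nat.mul_add_div hk0]
      rw [show r + k - 1 = k * 1 + (r - 1) by omega, Nat.mul_add_div hk0]
      rw [Nat.div_eq_of_lt (by omega)]
    have hnotin : (xs.drop (q * k)).take k ∉ (xs.drop (0 * k)).take k
        :: (List.range (q - 1)).map (fun t => (xs.drop ((t + 1) * k)).take k) := by
      intro hmem
      rcases List.mem_cons.mp hmem with h | h
      · rw [h] at hFq; omega
      · have h2 := hmidlen _ h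
        omega
    rw [hqq, hrangeq (q + 1) (by omega)]
    simp only [Nat.add_sub_cancel]
    rw [hsplit]
    rw [show (xs.drop (0 * k)).take k
        :: ((List.range (q - 1)).map (fun t => (xs.drop ((t + 1) * k)).take k)
          ++ [(xs.drop (q * k)).take k])
      = ((xs.drop (0 * k)).take k
        :: (List.range (q - 1)).map (fun t => (xs.drop ((t + 1) * k)).take k))
          ++ [(xs.drop (q * k)).take k] from rfl]
    rw [pvGLen_one_eq_scan _ _ _ hnotin]
    rw [pvScan_append_last _ _ le_rfl _ hnotin]
    simp

-- sentinel-free RLE over a block list, state (current block, its count)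
def pvG2 (cur : List Char) (amt : Int) : List (List Char) → Int
  | [] => (if 1 < amt then pvDigits amt else 0) + (cur.length : Int)
  | w :: ws =>
      if cur == w then pvG2 cur (amt + 1) ws
      else (if 1 < amt then pvDigits amt else 0) + (cur.length : Int) + pvG2 w 1 ws

lemma pvG2_eq_scan : ∀ (ws : List (List Char)) (cur : List Char) (amt : Int), 1 ≤ amt →
    pvG2 cur amt ws =
      (if 1 < amt + (pvRunLen cur ws : Int) then pvDigits (amt + (pvRunLen cur ws : Int)) else 0)
        + (cur.length : Int) + pvScan (ws.drop (pvRunLen cur ws)) 0 := by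
  intro ws
  induction ws with
  | nil =>
    intro cur amt ha
    simp [pvG2, pvRunLen, pvScan]
  | cons w ws' ih =>
    intro cur amt ha
    by_cases hcw : cur = w
    · subst hcw
      have hbb : (cur == cur) = true := by simp
      simp only [pvG2, hbb, if_true, pvRunLen, Nat.cast_add, Nat.cast_one, List.drop_succ_cons]
      rw [ih cur (amt + 1) (by omega)]
      have : amt + 1 + (pvRunLen cur ws' : Int) = amt + ((pvRunLen cur ws' : Int) + 1) := by ring
      rw [this]
    · have hcw' : ¬ (cur == w) := by simp [beq_iff_eq, hcw]
      have hwc' : ¬ (w == cur) := by simp [beq_iff_eq]; exact fun h => hcw h.symm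
      simp only [pvG2, hcw', hwc', Bool.false_eq_true, if_false, pvRunLen,
        Nat.cast_zero, add_zero, List.drop_zero]
      rw [ih w 1 le_rfl]
      rw [pvScan_cons]
      rw [pvScan_acc (ws'.drop (pvRunLen w ws'))
        (0 + (w.length : Int)
          + (if 1 < pvRunLen w ws' + 1 then pvDigits ((pvRunLen w ws' + 1 : Nat) : Int) else 0))]
      have hc : ((pvRunLen w ws' + 1 : Nat) : Int) = 1 + (pvRunLen w ws' : Int) := by
        push_cast; ring
      have hcond : (1 < pvRunLen w ws' + 1) ↔ (1 < 1 + (pvRunLen w ws' : Int)) := by omega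
      rw [if_congr hcond (by rw [hc]) rfl]
      ring

lemma pvScan_eq_G2 (cur : List Char) (ws : List (List Char)) :
    pvScan (cur :: ws) 0 = pvG2 cur 1 ws := by
  rw [pvG2_eq_scan ws cur 1 le_rfl, pvScan_cons]
  rw [pvScan_acc (ws.drop (pvRunLen cur ws))
    (0 + (cur.length : Int)
      + (if 1 < pvRunLen cur ws + 1 then pvDigits ((pvRunLen cur ws + 1 : Nat) : Int) else 0))]
  have hc : ((pvRunLen cur ws + 1 : Nat) : Int) = 1 + (pvRunLen cur ws : Int) := by push_cast; ring
  have hcond : (1 < pvRunLen cur ws + 1) ↔ (1 < 1 + (pvRunLen cur ws : Int)) := by omega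
  rw [if_congr hcond (by rw [hc]) rfl]
  ring

-- adjacent pairs of a block chain
def pvPairs : List Char → List (List Char) → List (List Char × List Char)
  | _, [] => []
  | cur, w :: ws => (cur, w) :: pvPairs w ws

-- B's inner-loop body, on an adjacent pair of blocks
def pvStepB (k : Int) (st : Int × Int) (p : List Char × List Char) : Int × Int :=
  if p.1 == p.2 then (st.1, st.2 + 1)
  else (st.1 + k + (if 1 < st.2 then pvDigits st.2 else 0), 1)

lemma pvPairs_map (m : Nat) : ∀ (F : Nat → List Char),
    (List.range m).map (fun t => (F t, F (t + 1)))
      = pvPairs (F 0) ((List.range m).map (fun t => F (t + 1))) := by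
  induction m with
  | zero => intro F; rfl
  | succ m ih =>
    intro F
    rw [List.range_succ_eq_map, List.map_cons, List.map_cons, List.map_map, List.map_map]
    rw [pvPairs]
    congr 1
    exact ih (fun t => F (t + 1))

lemma pvChainFold (k : Nat) : ∀ (ws : List (List Char)) (cur : List Char) (total run : Int),
    1 ≤ run → cur.length = k → (∀ w ∈ ws.dropLast, w.length = k) →
    ((pvPairs cur ws).foldl (pvStepB k) (total, run)).1
      + (((ws.getLastD cur).length : Int))
      + (if 1 < ((pvPairs cur ws).foldl (pvStepB k) (total, run)).2
         then pvDigits ((pvPairs cur ws).foldl (pvStepB k) (total, run)).2 else 0)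
    = total + pvG2 cur run ws := by
  intro ws
  induction ws with
  | nil =>
    intro cur total run h1 hck _
    simp only [pvPairs, List.foldl_nil, List.getLastD_nil, pvG2]
    ring
  | cons w ws' ih =>
    intro cur total run h1 hck hdl
    by_cases hcw : cur = w
    · subst hcw
      have hbb : (cur == cur) = true := by simp
      simp only [pvPairs, List.foldl_cons, pvStepB, hbb, if_true, List.getLastD_cons, pvG2]
      exact ih cur total (run + 1) (by omega) hck
        (fun w' hw' => hdl w' (by
          cases ws' with
          | nil => simp at hw'
          | cons a as => simpa using Or.inr (by simpa using hw')))
    · have hcw' : ¬ (cur == w) := by simp [beq_iff_eq, hcw]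
      simp only [pvPairs, List.foldl_cons, pvStepB, hcw', Bool.false_eq_true, if_false,
        List.getLastD_cons, pvG2]
      cases ws' with
      | nil =>
        simp only [pvPairs, List.foldl_nil, List.getLastD_nil, pvG2]
        have : ¬ ((1 : Int) < 1) := by omega
        rw [if_neg this, hck]
        ring
      | cons a as =>
        have hw : w.length = k := hdl w (by simp)
        rw [ih w (total + k + (if 1 < run then pvDigits run else 0)) 1 le_rfl hw
          (fun w' hw' => hdl w' (by simpa using Or.inr (by simpa using hw')))]
        rw [hck]
        ring

-- B's per-block-size value equals the run-length scan of the block list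
lemma inner_eq_B (xs : List Char) (k : Nat) (hk : 1 ≤ k) (hkm : 2 * k ≤ xs.length) :
    ((PySem.List.pyRange 1
          (PySem.Int.floordiv ((xs.length : Int) + (k : Int) - 1) (k : Int)) 1).foldl
        (fun st t =>
          if (k : Int) ≤ (xs.length : Int) - t * (k : Int) ∧
             (k : Int) ≤ pvGet2 (pvTbl xs 0) ((t - 1) * (k : Int)) (t * (k : Int))
          then (st.1, st.2 + 1)
          else (st.1 + (k : Int) + (if 1 < st.2 then pvDigits st.2 else 0), (1 : Int)))
        ((0 : Int), (1 : Int))).1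
      + ((xs.length : Int)
         - (PySem.Int.floordiv ((xs.length : Int) + (k : Int) - 1) (k : Int) - 1) * (k : Int))
      + (if 1 < ((PySem.List.pyRange 1
          (PySem.Int.floordiv ((xs.length : Int) + (k : Int) - 1) (k : Int)) 1).foldl
        (fun st t =>
          if (k : Int) ≤ (xs.length : Int) - t * (k : Int) ∧
             (k : Int) ≤ pvGet2 (pvTbl xs 0) ((t - 1) * (k : Int)) (t * (k : Int))
          then (st.1, st.2 + 1)
          else (st.1 + (k : Int) + (if 1 < st.2 then pvDigits st.2 else 0), (1 : Int)))
        ((0 : Int), (1 : Int))).2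
         then pvDigits ((PySem.List.pyRange 1
          (PySem.Int.floordiv ((xs.length : Int) + (k : Int) - 1) (k : Int)) 1).foldl
        (fun st t =>
          if (k : Int) ≤ (xs.length : Int) - t * (k : Int) ∧
             (k : Int) ≤ pvGet2 (pvTbl xs 0) ((t - 1) * (k : Int)) (t * (k : Int))
          then (st.1, st.2 + 1)
          else (st.1 + (k : Int) + (if 1 < st.2 then pvDigits st.2 else 0), (1 : Int)))
        ((0 : Int), (1 : Int))).2 else 0)
    = pvScan ((List.range ((xs.length + k - 1) / k)).map
        (fun t => (xs.drop (t * k)).take k)) 0 := by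
  have hk0 : 0 < k := hk
  set n := xs.length with hn
  set M := (n + k - 1) / k with hM
  set F : Nat → List Char := fun t => (xs.drop (t * k)).take k with hF
  have hdm : k * M + (n + k - 1) % k = n + k - 1 := by
    rw [hM]; exact Nat.div_add_mod (n + k - 1) k
  have hmod : (n + k - 1) % k < k := Nat.mod_lt _ hk0
  have hnM : n ≤ k * M := by omega
  have hMn : k * M ≤ n + k - 1 := by omega
  have hM2 : 2 ≤ M := Nat.le_of_mul_le_mul_left (by omega : k * 2 ≤ k * M) hk0
  have hMk : M * k = k * M := Nat.mul_comm _ _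
  have hM1k : (M - 1) * k + k = M * k := by
    rw [show M = (M - 1) + 1 by omega, Nat.add_sub_cancel, add_mul, one_mul]
  have hFlen : ∀ t, t + 1 ≤ M - 1 → (F t).length = k := by
    intro t ht
    simp only [hF, List.length_take, List.length_drop]
    have h1 : (t + 1) * k ≤ (M - 1) * k := Nat.mul_le_mul_right k ht
    have h3 : (t + 1) * k = t * k + k := by ring
    omega
  have hfd : PySem.Int.floordiv ((n : Int) + (k : Int) - 1) (k : Int) = (M : Int) := by
    rw [show (n : Int) + (k : Int) - 1 = ((n + k - 1 : Nat) : Int) by omega]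
    exact_mod_cast PySem.Int.floordiv_natCast (n + k - 1) k
  rw [hfd]
  rw [PySem.List.pyRange_one, show ((M : Int) - 1).toNat = M - 1 by omega, List.foldl_map]
  have hfold : (List.range (M - 1)).foldl
      (fun st (t : Nat) =>
        if (k : Int) ≤ (n : Int) - (1 + (t : Int)) * (k : Int) ∧
           (k : Int) ≤ pvGet2 (pvTbl xs 0) ((1 + (t : Int) - 1) * (k : Int)) ((1 + (t : Int)) * (k : Int))
        then (st.1, st.2 + 1)
        else (st.1 + (k : Int) + (if 1 < st.2 then pvDigits st.2 else 0), (1 : Int)))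
      ((0 : Int), (1 : Int))
    = (pvPairs (F 0) ((List.range (M - 1)).map (fun t => F (t + 1)))).foldl
        (pvStepB (k : Int)) ((0 : Int), (1 : Int)) := by
    rw [← pvPairs_map, List.foldl_map]
    apply PySem.List.foldl_congr_mem
    intro st t hmem
    have htM : t < M - 1 := List.mem_range.mp hmem
    have e1 : ((1 : Int) + (t : Int) - 1) * (k : Int) = ((t * k : Nat) : Int) := by
      push_cast; ring
    have e2 : ((1 : Int) + (t : Int)) * (k : Int) = (((t + 1) * k : Nat) : Int) := by
      push_cast; ring
    have hb1 : (t + 1) * k ≤ (M - 1) * k := Nat.mul_le_mul_right k (by omega)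
    have h3 : (t + 1) * k = t * k + k := by ring
    rw [e1, e2, pvGet2_tbl xs (t * k) ((t + 1) * k) (by omega) (by omega)]
    have hiff : ((k : Int) ≤ (n : Int) - (((t + 1) * k : Nat) : Int) ∧
        (k : Int) ≤ ((pvLcpN (xs.drop (t * k)) (xs.drop ((t + 1) * k)) : Nat) : Int))
        ↔ ((F t == F (t + 1)) = true) := by
      rw [beq_iff_eq]
      by_cases hfull : (t + 1) * k + k ≤ n
      · have hc1 : (k : Int) ≤ (n : Int) - (((t + 1) * k : Nat) : Int) := by omega
        have hlcp := pvLcpN_ge_iff k (xs.drop (t * k)) (xs.drop ((t + 1) * k))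
          (by simp only [List.length_drop]; omega)
        constructor
        · rintro ⟨-, h2⟩
          exact hlcp.mp (by exact_mod_cast h2)
        · intro h
          exact ⟨hc1, by exact_mod_cast hlcp.mpr h⟩
      · constructor
        · rintro ⟨h1, -⟩
          exfalso; omega
        · intro h
          exfalso
          have l1 : (F t).length = k := hFlen t (by omega)
          have l2 : (F (t + 1)).length < k := by
            simp only [hF, List.length_take, List.length_drop]
            omega
          rw [h] at l1
          omega
    simp only [pvStepB]
    exact if_congr hiff rfl rfl
  rw [hfold]
  have hsplitw : List.range (M - 1) = List.range (M - 2) ++ [M - 2] := by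
    rw [← List.range_succ]
    congr 1
    omega
  have hlast : (((List.range (M - 1)).map (fun t => F (t + 1))).getLastD (F 0)) = F (M - 1) := by
    rw [hsplitw, List.map_append, List.map_cons, List.map_nil, List.getLastD_concat]
    congr 1
    omega
  have hcastMk : ((M : Int) - 1) * (k : Int) = (((M - 1) * k : Nat) : Int) := by
    rw [show ((M : Int) - 1) = (((M - 1 : Nat)) : Int) by omega]
    push_cast; ring
  have hlastlen : ((xs.length : Int)
      - ((M : Int) - 1) * (k : Int))
      = (((((List.range (M - 1)).map (fun t => F (t + 1))).getLastD (F 0)).length : Int)) := by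
    rw [hlast]
    simp only [hF, List.length_take, List.length_drop]
    rw [hcastMk]
    omega
  rw [hlastlen]
  have hdl : ∀ w ∈ (((List.range (M - 1)).map (fun t => F (t + 1))).dropLast), w.length = k := by
    rw [hsplitw, List.map_append, List.map_cons, List.map_nil, List.dropLast_concat]
    intro w hw
    obtain ⟨t, ht, rfl⟩ := List.mem_map.mp hw
    exact hFlen (t + 1) (by simp at ht; omega)
  rw [pvChainFold k ((List.range (M - 1)).map (fun t => F (t + 1))) (F 0) 0 1 le_rfl
    (hFlen 0 (by omega)) hdl]
  rw [← pvScan_eq_G2]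
  rw [show (List.range M).map F = F 0 :: (List.range (M - 1)).map (fun t => F (t + 1)) by
    conv_lhs => rw [show M = (M - 1) + 1 by omega]
    rw [List.range_succ_eq_map, List.map_cons, List.map_map]
    rfl]
  ring

-- ===== VERDICT (by name: the statement is the Claim_ definition above) =====
theorem solution_spec : Claim_equal_solution := by
  unfold Claim_equal_solution
  intro s _
  unfold Spec_solution solution solution_alt
  simp only [PySem.Str.len_eq]
  have hinit : [PySem.List.pyRepeat [(0 : Int)] ((s.toList.length : Int) + 1)]
      = pvTbl s.toList s.toList.length := by
    rw [PySem.List.pyRepeat_singleton, pvTbl_top, pvRow_top,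
      show (((s.toList.length : Int)) + 1).toNat = s.toList.length + 1 by omega]
  rw [hinit, pvTbl_build s.toList s.toList.length le_rfl]
  apply PySem.List.foldl_congr_mem
  intro acc kk hkmem
  rw [PySem.List.mem_pyRange_one] at hkmem
  obtain ⟨h1, h2⟩ := hkmem
  obtain ⟨k, rfl⟩ : ∃ k : Nat, kk = (k : Int) :=
    ⟨kk.toNat, (Int.toNat_of_nonneg (by omega)).symm⟩
  have hk1 : 1 ≤ k := by exact_mod_cast h1
  have hfd : PySem.Int.floordiv ((s.toList.length : Nat) : Int) 2
      = ((s.toList.length / 2 : Nat) : Int) := by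
    exact_mod_cast PySem.Int.floordiv_natCast s.toList.length 2
  rw [hfd] at h2
  have hk2 : 2 * k ≤ s.toList.length := by
    have hkd : (k : Int) ≤ ((s.toList.length / 2 : Nat) : Int) := by omega
    have : k ≤ s.toList.length / 2 := by exact_mod_cast hkd
    omega
  exact congrArg (min acc)
    ((inner_eq s.toList k hk1 hk2).trans (inner_eq_B s.toList k hk1 hk2).symm)
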